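-- pv_equiv track=rewrite | github.com/WuKunhuan163/CLITools | logic/_/test/runner.py | _get_error_reason
-- ===== SOURCE A (Python) =====
-- def _get_error_reason(output):
--     lines = [line.strip() for line in output.splitlines() if line.strip()]
--     if not lines:
--         return "No output"
--     markers = ["AssertionError:", "ModuleNotFoundError:", "TypeError:", "ValueError:", "RuntimeError:"]
--     for line in reversed(lines):
--         for marker in markers:
--             if marker in line:
--                 idx = line.find(marker)
--                 reason = line[idx:]
--                 return reason[:100] + "..." if len(reason) > 100 else reason
--     for line in reversed(lines):
--         if "Error:" in line:
--             return line[:100] + "..." if len(line) > 100 else line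
--     return lines[-1][:100] + "..." if len(lines[-1]) > 100 else lines[-1]
-- ===== SOURCE B (Python) =====
-- def _truncate(s):
--     return s[:100] + "..." if len(s) > 100 else s
--
-- def _get_error_reason(output):
--     lines = [line.strip() for line in output.splitlines() if line.strip()]
--     if not lines:
--         return "No output"
--     markers = ["AssertionError:", "ModuleNotFoundError:", "TypeError:", "ValueError:", "RuntimeError:"]
--     error_line = None
--     for line in reversed(lines):
--         for marker in markers:
--             if marker in line:
--                 return _truncate(line[line.find(marker):])
--         if error_line is None and "Error:" in line:
--             error_line = line
--     return _truncate(error_line if error_line is not None else lines[-1])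
-- ===== Notes on version B (the rewrite author's own statement) =====
-- stated objective: simpler
-- what changed: Fuses A's two separate reversed scans into one reversed pass that returns immediately on a marker hit and remembers the first generic 'Error:' line in an accumulator, with the repeated truncation expression factored into a helper.
import Mathlib
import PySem

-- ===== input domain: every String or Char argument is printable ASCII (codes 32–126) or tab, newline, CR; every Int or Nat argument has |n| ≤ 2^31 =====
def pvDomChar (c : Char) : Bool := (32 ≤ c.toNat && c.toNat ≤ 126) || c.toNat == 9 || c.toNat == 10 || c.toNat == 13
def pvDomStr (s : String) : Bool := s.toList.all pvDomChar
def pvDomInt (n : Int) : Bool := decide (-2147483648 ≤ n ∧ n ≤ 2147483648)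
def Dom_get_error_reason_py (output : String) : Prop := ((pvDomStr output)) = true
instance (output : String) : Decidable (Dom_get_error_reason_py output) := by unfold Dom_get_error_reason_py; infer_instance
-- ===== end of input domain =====

-- B fuses A's two reversed scans into one pass with an accumulator and factors the truncation; same cost, simpler.

def pvMarkers : List String := ["AssertionError:", "ModuleNotFoundError:", "TypeError:", "ValueError:", "RuntimeError:"]

-- shared inner marker loop: first marker contained in the line, sliced from its first occurrence
def pvScanMarkers (markers : List String) (line : String) : Option String :=
  match markers with
  | [] => none
  | m :: ms =>
    if PySem.Str.isIn m line then
      some (PySem.Str.slice line (some (PySem.Str.find line m)) none)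
    else pvScanMarkers ms line

-- ===== PORT A =====
def pvALoop1 (ls : List String) : Option String :=
  match ls with
  | [] => none
  | line :: rest =>
    match pvScanMarkers pvMarkers line with
    | some reason =>
      some (if PySem.Str.len reason > 100 then PySem.Str.slice reason none (some 100) ++ "..." else reason)
    | none => pvALoop1 rest

def pvALoop2 (ls : List String) : Option String :=
  match ls with
  | [] => none
  | line :: rest =>
    if PySem.Str.isIn "Error:" line then
      some (if PySem.Str.len line > 100 then PySem.Str.slice line none (some 100) ++ "..." else line)
    else pvALoop2 rest

def get_error_reason_py (output : String) : String :=
  let lines := ((PySem.Str.splitlines output).map PySem.Str.strip).filter (fun l => l ≠ "")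
  if lines = [] then "No output"
  else
    match pvALoop1 lines.reverse with
    | some r => r
    | none =>
      match pvALoop2 lines.reverse with
      | some r => r
      | none =>
        let last := (PySem.List.pyGet? lines (-1)).getD ""
        if PySem.Str.len last > 100 then PySem.Str.slice last none (some 100) ++ "..." else last

-- ===== PORT B =====
def pvTrunc (s : String) : String :=
  if PySem.Str.len s > 100 then PySem.Str.slice s none (some 100) ++ "..." else s

def pvBLoop (ls : List String) (err : Option String) (last : String) : String :=
  match ls with
  | [] => pvTrunc (err.getD last)
  | line :: rest =>
    match pvScanMarkers pvMarkers line with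
    | some reason => pvTrunc reason
    | none =>
      pvBLoop rest (if err.isNone && PySem.Str.isIn "Error:" line then some line else err) last

def get_error_reason_py_alt (output : String) : String :=
  let lines := ((PySem.Str.splitlines output).map PySem.Str.strip).filter (fun l => l ≠ "")
  if lines = [] then "No output"
  else pvBLoop lines.reverse none ((PySem.List.pyGet? lines (-1)).getD "")

-- ===== PRECONDITION & SPEC =====
def Spec_get_error_reason_py (output : String) (out : String) : Prop := out = get_error_reason_py_alt output
instance (output : String) (out : String) : Decidable (Spec_get_error_reason_py output out) := by unfold Spec_get_error_reason_py; infer_instance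

-- ===== CLAIM (what is proved, stated in full; the proofs are below) =====
def Claim_equal_get_error_reason_py : Prop := ∀ (output : String), Dom_get_error_reason_py output → Spec_get_error_reason_py output (get_error_reason_py output)

-- ===== LEMMAS AND PROOFS =====
-- the fused loop equals: loop1 result, else the remembered line, else loop2, else the last line
theorem pvBLoop_eq (ls : List String) (err : Option String) (last : String) :
    pvBLoop ls err last =
      match pvALoop1 ls with
      | some r => r
      | none =>
        match err with
        | some e => pvTrunc e
        | none =>
          match pvALoop2 ls with
          | some r => r
          | none => pvTrunc last := by
  induction ls generalizing err with
  | nil => cases err <;> simp [pvBLoop, pvALoop1, pvALoop2]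
  | cons line rest ih =>
    simp only [pvBLoop, pvALoop1, pvALoop2]
    cases h : pvScanMarkers pvMarkers line with
    | some reason => simp [pvTrunc]
    | none =>
      rw [ih]
      cases err with
      | some e => simp
      | none =>
        by_cases hl : PySem.Chars.isIn ['E','r','r','o','r',':'] line.toList = true <;>
          simp [hl, pvTrunc]

theorem get_error_reason_py_spec : Claim_equal_get_error_reason_py := by
  intro output _
  show _ = _
  unfold get_error_reason_py get_error_reason_py_alt
  simp only []
  split
  · rfl
  · rw [pvBLoop_eq]
    cases h1 : pvALoop1 (((PySem.Str.splitlines output).map PySem.Str.strip).filter (fun l => l ≠ "")).reverse with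
    | some r => simp
    | none =>
      cases h2 : pvALoop2 (((PySem.Str.splitlines output).map PySem.Str.strip).filter (fun l => l ≠ "")).reverse with
      | some r => simp
      | none => simp [pvTrunc]
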